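-- pv_equiv track=rewrite | github.com/zcorpan/reformahtml | reformahtml.py | _count_trailing_lfs_ignoring_spaces
-- ===== SOURCE A (Python) =====
-- def _count_trailing_lfs_ignoring_spaces(s: str) -> int:
--     """Count trailing '\n' in s, ignoring trailing spaces/tabs after them."""
--     t = s.rstrip(' \t')
--     k = 0
--     i = len(t) - 1
--     while i >= 0 and t[i] == '\n':
--         k += 1
--         i -= 1
--     return k
-- ===== SOURCE B (Python) =====
-- def _count_trailing_lfs_ignoring_spaces(s: str) -> int:
--     """Count trailing '\n' in s, ignoring trailing spaces/tabs after them."""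
--     run = 0
--     pending = False
--     for c in s:
--         if c == '\n':
--             run = 1 if pending else run + 1
--             pending = False
--         elif c == ' ' or c == '\t':
--             pending = True
--         else:
--             run = 0
--             pending = False
--     return run
-- ===== Notes on version B (the rewrite author's own statement) =====
-- stated objective: alternative
-- what changed: Replaces A's two-stage strip-then-backward-scan with a single forward pass maintaining a (run, pending) state machine: run counts the current trailing newline streak, pending records whether the last character was a space/tab.
import Mathlib
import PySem

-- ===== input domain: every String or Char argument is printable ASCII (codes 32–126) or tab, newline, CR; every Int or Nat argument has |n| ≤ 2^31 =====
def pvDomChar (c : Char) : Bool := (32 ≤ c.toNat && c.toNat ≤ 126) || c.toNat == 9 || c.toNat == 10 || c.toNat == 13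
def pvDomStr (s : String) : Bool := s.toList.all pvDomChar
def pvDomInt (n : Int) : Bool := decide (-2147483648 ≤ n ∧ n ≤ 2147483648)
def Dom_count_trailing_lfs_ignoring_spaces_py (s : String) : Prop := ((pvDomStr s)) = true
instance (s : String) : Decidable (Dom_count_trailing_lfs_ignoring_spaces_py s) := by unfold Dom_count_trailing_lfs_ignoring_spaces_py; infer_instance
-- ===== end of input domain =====

-- B replaces A's strip-then-backward-scan by a single forward pass with a (run, pending) state machine: alternative decomposition, same cost.


-- ===== PORT A =====
-- s.rstrip(chars): drop the given chars from the right end; exact for ASCII inputs.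
def pvRstrip (cs : List Char) (chars : List Char) : List Char :=
  (cs.reverse.dropWhile (fun c => chars.contains c)).reverse

-- the while loop 'while i >= 0 and t[i] == '\n': k += 1; i -= 1'; argument is i+1 so the 0 case is 'i < 0'
def pvLoopA (t : List Char) : Nat → Int → Int
  | 0, k => k
  | Nat.succ i, k => if t[i]? = some '\n' then pvLoopA t i (k + 1) else k

def count_trailing_lfs_ignoring_spaces_py (s : String) : Int :=
  let t := pvRstrip s.toList [' ', '\t']
  pvLoopA t t.length 0

-- ===== PORT B =====
-- one forward pass: run = current count of trailing newlines, pending = last char was a space/tab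
def pvStepB (st : Int × Bool) (c : Char) : Int × Bool :=
  if c = '\n' then ((if st.2 then 1 else st.1 + 1), false)
  else if c = ' ' ∨ c = '\t' then (st.1, true)
  else (0, false)

def count_trailing_lfs_ignoring_spaces_py_alt (s : String) : Int :=
  (s.toList.foldl pvStepB (0, false)).1

-- ===== PRECONDITION & SPEC =====
def Spec_count_trailing_lfs_ignoring_spaces_py (s : String) (out : Int) : Prop := out = count_trailing_lfs_ignoring_spaces_py_alt s
instance (s : String) (out : Int) : Decidable (Spec_count_trailing_lfs_ignoring_spaces_py s out) := by unfold Spec_count_trailing_lfs_ignoring_spaces_py; infer_instance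

-- ===== CLAIM =====
def Claim_equal_count_trailing_lfs_ignoring_spaces_py : Prop := ∀ (s : String), Dom_count_trailing_lfs_ignoring_spaces_py s → Spec_count_trailing_lfs_ignoring_spaces_py s (count_trailing_lfs_ignoring_spaces_py s)

-- ===== LEMMAS AND PROOFS =====

def pvIsST (c : Char) : Bool := c == ' ' || c == '\t'
-- abstract value of both programs: length of the leading '\n'-run of the reversed string after dropping trailing spaces/tabs
def pvTl (l : List Char) : Int := ((l.reverse.dropWhile pvIsST).takeWhile (fun c => c == '\n')).length
def pvPend (l : List Char) : Bool := match l.reverse with | [] => false | c :: _ => pvIsST c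

-- the while loop of A never looks past index i
theorem pvLoopA_append (l : List Char) (c : Char) :
    ∀ (i : Nat) (k : Int), i ≤ l.length → pvLoopA (l ++ [c]) i k = pvLoopA l i k := by
  intro i
  induction i with
  | zero => intro k _; simp [pvLoopA]
  | succ i ih =>
    intro k hi
    have hlt : i < l.length := Nat.lt_of_succ_le hi
    have : (l ++ [c])[i]? = l[i]? := by rw [List.getElem?_append_left hlt]
    simp only [pvLoopA, this]
    split <;> simp [ih _ (Nat.le_of_lt hlt)]

-- the while loop of A counts the leading '\n'-run of the reversed list
theorem pvLoopA_eq (r : List Char) :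
    ∀ (k : Int), pvLoopA r.reverse r.length k = k + ((r.takeWhile (fun c => c == '\n')).length : Int) := by
  induction r with
  | nil => intro k; simp [pvLoopA]
  | cons c r ih =>
    intro k
    have hget : (r.reverse ++ [c])[r.length]? = some c := by
      rw [List.getElem?_append_right (by simp)]; simp
    by_cases hc : c = '\n'
    · subst hc
      simp only [List.reverse_cons, List.length_cons, pvLoopA, hget]
      rw [if_pos trivial]
      rw [pvLoopA_append _ _ _ _ (by simp), ih]
      simp [List.takeWhile]
      ring
    · simp only [List.reverse_cons, List.length_cons, pvLoopA, hget]
      rw [if_neg (by simpa using hc)]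
      have hcb : (c == '\n') = false := by simpa using hc
      simp [List.takeWhile, hcb]

-- A computes pvTl
theorem portA_eq (s : String) : count_trailing_lfs_ignoring_spaces_py s = pvTl s.toList := by
  unfold count_trailing_lfs_ignoring_spaces_py pvRstrip pvTl
  have hfun : (fun c => List.contains [' ', '\t'] c) = pvIsST := by
    funext c; by_cases h1 : c = ' ' <;> by_cases h2 : c = '\t' <;> simp [pvIsST, h1, h2]
  simp only [hfun]
  have h := pvLoopA_eq (s.toList.reverse.dropWhile pvIsST) 0
  simpa using h

-- invariant of B's fold
theorem foldB_eq (l : List Char) : l.foldl pvStepB (0, false) = (pvTl l, pvPend l) := by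
  induction l using List.reverseRecOn with
  | nil => simp [pvTl, pvPend]
  | append_singleton l c ih =>
    rw [List.foldl_append, ih]
    simp only [List.foldl]
    unfold pvStepB
    by_cases hn : c = '\n'
    · subst hn
      have h1 : pvIsST '\n' = false := by decide
      rw [if_pos rfl]
      refine Prod.ext ?_ (by simp [pvPend, h1])
      simp only [pvTl, List.reverse_append, List.reverse_singleton, List.singleton_append,
        List.dropWhile_cons, h1, Bool.false_eq_true, if_false, List.takeWhile_cons]
      by_cases hp : pvPend l = true
      · rw [if_pos hp]
        cases hr : l.reverse with
        | nil => simp [pvPend, hr] at hp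
        | cons c0 r =>
          have hc0 : pvIsST c0 = true := by simpa [pvPend, hr] using hp
          have hc0n : (c0 == '\n') = false := by
            rcases (by simpa [pvIsST] using hc0 : c0 = ' ' ∨ c0 = '\t') with h | h <;> simp [h]
          simp [hc0n]
      · rw [if_neg hp]
        have hdl : l.reverse.dropWhile pvIsST = l.reverse := by
          cases hr : l.reverse with
          | nil => simp
          | cons c0 r =>
            have hc0 : pvIsST c0 = false := by
              have := hp; simp [pvPend, hr] at this; simpa using this
            simp [hc0]
        simp [hdl]
    · by_cases hst : c = ' ' ∨ c = '\t'
      · rw [if_neg hn, if_pos hst]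
        have hstb : pvIsST c = true := by rcases hst with h | h <;> simp [pvIsST, h]
        refine Prod.ext ?_ ?_
        · simp [pvTl, hstb]
        · simp [pvPend, hstb]
      · rw [if_neg hn, if_neg hst]
        have hstb : pvIsST c = false := by
          simp only [pvIsST, Bool.or_eq_false_iff, beq_eq_false_iff_ne, ne_eq]
          exact ⟨fun h => hst (Or.inl h), fun h => hst (Or.inr h)⟩
        have hcn : (c == '\n') = false := by simpa using hn
        refine Prod.ext ?_ ?_
        · simp [pvTl, hstb, hcn]
        · simp [pvPend, hstb]

-- ===== VERDICT =====
theorem count_trailing_lfs_ignoring_spaces_py_spec : Claim_equal_count_trailing_lfs_ignoring_spaces_py := by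
  intro s _
  unfold Spec_count_trailing_lfs_ignoring_spaces_py count_trailing_lfs_ignoring_spaces_py_alt
  rw [foldB_eq, portA_eq]
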